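-- pv_equiv track=rewrite | github.com/chaseballernesbit-sys/nhl-picks-dashboard | generate_dashboard.py | compute_nhl_stats
-- ===== SOURCE A (Python) =====
-- def compute_nhl_stats(picks: list) -> dict:
--     """Compute W-L records for NHL top picks by type."""
--     stats = {
--         "ml": {"wins": 0, "losses": 0},
--         "total": {"wins": 0, "losses": 0},
--         "pl": {"wins": 0, "losses": 0},
--     }
--
--     for p in picks:
--         if p.get("ml_correct") is True:
--             stats["ml"]["wins"] += 1
--         elif p.get("ml_correct") is False:
--             stats["ml"]["losses"] += 1
--
--         if p.get("total_correct") is True: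
--             stats["total"]["wins"] += 1
--         elif p.get("total_correct") is False:
--             stats["total"]["losses"] += 1
--
--         if p.get("pl_correct") is True:
--             stats["pl"]["wins"] += 1
--         elif p.get("pl_correct") is False:
--             stats["pl"]["losses"] += 1
--
--     w = stats["ml"]["wins"] + stats["total"]["wins"] + stats["pl"]["wins"]
--     l = stats["ml"]["losses"] + stats["total"]["losses"] + stats["pl"]["losses"]
--     stats["overall"] = {"wins": w, "losses": l}
--
--     return stats
-- ===== SOURCE B (Python) =====
-- def compute_nhl_stats(picks: list) -> dict:
--     """Compute W-L records for NHL top picks by type (per-category generator sums)."""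
--     ml_w = sum(1 for p in picks if p.get("ml_correct") is True)
--     ml_l = sum(1 for p in picks if p.get("ml_correct") is False)
--     to_w = sum(1 for p in picks if p.get("total_correct") is True)
--     to_l = sum(1 for p in picks if p.get("total_correct") is False)
--     pl_w = sum(1 for p in picks if p.get("pl_correct") is True)
--     pl_l = sum(1 for p in picks if p.get("pl_correct") is False)
--     return {
--         "ml": {"wins": ml_w, "losses": ml_l},
--         "total": {"wins": to_w, "losses": to_l},
--         "pl": {"wins": pl_w, "losses": pl_l},
--         "overall": {"wins": ml_w + to_w + pl_w, "losses": ml_l + to_l + pl_l},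
--     }
-- ===== Notes on version B (the rewrite author's own statement) =====
-- stated objective: simpler
-- what changed: Replaces the single stateful loop with branch-driven counter updates by six independent generator-sums (one per category/outcome), assembling the result dict from those counts.
import Mathlib
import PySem

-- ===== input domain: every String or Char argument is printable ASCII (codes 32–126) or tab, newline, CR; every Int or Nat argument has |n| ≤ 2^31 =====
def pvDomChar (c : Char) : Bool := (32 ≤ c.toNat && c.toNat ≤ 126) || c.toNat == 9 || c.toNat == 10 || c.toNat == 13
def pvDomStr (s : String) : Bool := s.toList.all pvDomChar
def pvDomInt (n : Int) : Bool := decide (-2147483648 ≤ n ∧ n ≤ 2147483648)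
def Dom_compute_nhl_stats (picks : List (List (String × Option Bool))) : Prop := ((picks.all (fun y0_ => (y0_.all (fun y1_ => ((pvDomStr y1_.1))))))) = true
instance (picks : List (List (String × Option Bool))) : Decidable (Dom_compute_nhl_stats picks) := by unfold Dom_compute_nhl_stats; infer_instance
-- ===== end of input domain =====

-- B replaces A's single stateful loop by six independent per-category counts (simpler decomposition).

-- p.get(k): first-match lookup in the association list (dict keys are unique)
def pvGet (p : List (String × Option Bool)) (k : String) : Option (Option Bool) :=
  (p.find? (fun kv => kv.1 == k)).map (·.2)

-- ===== PORT A =====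
-- one loop iteration of A: update the six counters (mlW, mlL, toW, toL, plW, plL)
def stepA (s : Int × Int × Int × Int × Int × Int) (p : List (String × Option Bool)) :
    Int × Int × Int × Int × Int × Int :=
  let (mw, ml, tw, tl, pw, pl) := s
  let (mw, ml) :=
    if pvGet p "ml_correct" = some (some true) then (mw + 1, ml)
    else if pvGet p "ml_correct" = some (some false) then (mw, ml + 1)
    else (mw, ml)
  let (tw, tl) :=
    if pvGet p "total_correct" = some (some true) then (tw + 1, tl)
    else if pvGet p "total_correct" = some (some false) then (tw, tl + 1)
    else (tw, tl)
  let (pw, pl) :=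
    if pvGet p "pl_correct" = some (some true) then (pw + 1, pl)
    else if pvGet p "pl_correct" = some (some false) then (pw, pl + 1)
    else (pw, pl)
  (mw, ml, tw, tl, pw, pl)

def compute_nhl_stats (picks : List (List (String × Option Bool))) : List (String × List (String × Int)) :=
  let s := picks.foldl stepA (0, 0, 0, 0, 0, 0)
  let (mw, ml, tw, tl, pw, pl) := s
  [("ml", [("wins", mw), ("losses", ml)]),
   ("total", [("wins", tw), ("losses", tl)]),
   ("pl", [("wins", pw), ("losses", pl)]),
   ("overall", [("wins", mw + tw + pw), ("losses", ml + tl + pl)])]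

-- ===== PORT B =====
-- sum(1 for p in picks if p.get(k) is v)
def pvCount (picks : List (List (String × Option Bool))) (k : String) (v : Bool) : Int :=
  (picks.countP (fun p => pvGet p k == some (some v)) : Int)

def compute_nhl_stats_alt (picks : List (List (String × Option Bool))) : List (String × List (String × Int)) :=
  let mlW := pvCount picks "ml_correct" true
  let mlL := pvCount picks "ml_correct" false
  let toW := pvCount picks "total_correct" true
  let toL := pvCount picks "total_correct" false
  let plW := pvCount picks "pl_correct" true
  let plL := pvCount picks "pl_correct" false
  [("ml", [("wins", mlW), ("losses", mlL)]),
   ("total", [("wins", toW), ("losses", toL)]),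
   ("pl", [("wins", plW), ("losses", plL)]),
   ("overall", [("wins", mlW + toW + plW), ("losses", mlL + toL + plL)])]

-- ===== PRECONDITION & SPEC =====
def Spec_compute_nhl_stats (picks : List (List (String × Option Bool))) (out : List (String × List (String × Int))) : Prop := out = compute_nhl_stats_alt picks
instance (picks : List (List (String × Option Bool))) (out : List (String × List (String × Int))) : Decidable (Spec_compute_nhl_stats picks out) := by unfold Spec_compute_nhl_stats; infer_instance

-- ===== CLAIM (what is proved, stated in full; the proofs are below) =====
def Claim_equal_compute_nhl_stats : Prop := ∀ (picks : List (List (String × Option Bool))), Dom_compute_nhl_stats picks → Spec_compute_nhl_stats picks (compute_nhl_stats picks)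

-- ===== LEMMAS AND PROOFS =====
lemma pvCount_cons (p : List (String × Option Bool)) (ps : List (List (String × Option Bool))) (k : String) (v : Bool) :
    pvCount (p :: ps) k v = pvCount ps k v + (if pvGet p k = some (some v) then 1 else 0) := by
  simp only [pvCount, List.countP_cons]
  split_ifs with h <;> simp_all

lemma foldA_eq (picks : List (List (String × Option Bool))) (a b c d e f : Int) :
    picks.foldl stepA (a, b, c, d, e, f) =
      (a + pvCount picks "ml_correct" true, b + pvCount picks "ml_correct" false,
       c + pvCount picks "total_correct" true, d + pvCount picks "total_correct" false,
       e + pvCount picks "pl_correct" true, f + pvCount picks "pl_correct" false) := by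
  induction picks generalizing a b c d e f with
  | nil => simp [pvCount]
  | cons p ps ih =>
    simp only [List.foldl_cons, stepA]
    split_ifs with h1 h2 h3 h4 h5 h6 <;>
      simp only [ih, pvCount_cons, Prod.mk.injEq] <;>
      refine ⟨?_, ?_, ?_, ?_, ?_, ?_⟩ <;>
      simp_all <;> omega

-- ===== VERDICT (by name: the statement is the Claim_ definition above) =====
theorem compute_nhl_stats_spec : Claim_equal_compute_nhl_stats := by
  intro picks _
  show _ = _
  simp [compute_nhl_stats, compute_nhl_stats_alt, foldA_eq]
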